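-- pv_equiv track=rewrite | github.com/jatinarora2702/Competitive-Coding | codeforces/2123E.py | solve
-- ===== SOURCE A (Python) =====
-- def solve(a: list[int], n: int) -> list[int]:
--     freq = [0] * (n+1)
--     cnts = [0] * (n+1)
--     for x in a:
--         freq[x] += 1
--     i = 0
--     while i <= n and freq[i] > 0:
--         cnts[freq[i]] += 1
--         i += 1
--     surplus = n - i
--     cnt_tup = []
--     i = 0
--     while i <= n:
--         if cnts[i] > 0:
--             cnt_tup.append((i, cnts[i]))
--         i += 1
--     ans = []
--     i, k = 0, 0
--     val = 1
--     while i <= surplus: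
--         if k < len(cnt_tup) and i == cnt_tup[k][0]:
--             val += cnt_tup[k][1]
--             k += 1
--         ans.append(val)
--         i += 1
--     while i <= n:
--         ans.append(n - i + 1)
--         i += 1
--     return ans
-- ===== SOURCE B (Python) =====
-- def solve(a: list[int], n: int) -> list[int]:
--     freq = [0] * (n + 1)
--     for x in a:
--         freq[x] += 1
--     m = 0
--     while m <= n and freq[m] > 0:
--         m += 1
--     pf = sorted(freq[:m])
--     surplus = n - m
--     ans = []
--     p = 0
--     for i in range(surplus + 1):
--         while p < len(pf) and pf[p] <= i:
--             p += 1
--         ans.append(1 + p)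
--     for i in range(surplus + 1, n + 1):
--         ans.append(n - i + 1)
--     return ans
-- ===== Notes on version B (the rewrite author's own statement) =====
-- stated objective: alternative
-- what changed: B drops A's count-of-counts array, its prefix-sum accumulator and the sparse cnt_tup pointer merge entirely: it sorts the dense frequency prefix and ranks each output index i with a single monotone pointer, emitting 1 + (number of frequencies <= i).
import Mathlib
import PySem

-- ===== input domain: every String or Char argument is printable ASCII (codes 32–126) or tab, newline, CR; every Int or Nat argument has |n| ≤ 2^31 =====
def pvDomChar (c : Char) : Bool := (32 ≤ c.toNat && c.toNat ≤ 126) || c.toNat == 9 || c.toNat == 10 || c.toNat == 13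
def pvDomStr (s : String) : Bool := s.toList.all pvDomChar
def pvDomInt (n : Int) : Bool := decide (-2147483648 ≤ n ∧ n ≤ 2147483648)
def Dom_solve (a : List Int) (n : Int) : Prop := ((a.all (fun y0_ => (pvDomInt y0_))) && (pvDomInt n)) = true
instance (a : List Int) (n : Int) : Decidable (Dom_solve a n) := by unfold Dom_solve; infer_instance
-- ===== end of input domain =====

-- B replaces A's count-of-counts histogram, its prefix-sum accumulation and the sparse cnt_tup
-- pointer merge by SORTING the dense frequency prefix and ranking each index i with a monotone
-- pointer (answer = 1 + number of frequencies ≤ i) — a different algorithm of similar cost (objective: alternative).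

-- ===== PORT A =====
-- shared by both ports: `l[x] += 1` (both Pythons contain this identical statement);
-- an out-of-range x raises IndexError in Python (excluded by Pre_solve) — there the total form leaves l unchanged
def pyIncAt (l : List Int) (x : Int) : List Int :=
  PySem.List.pySetD l x (PySem.List.pyGetD l x 0 + 1)

-- A: `while i <= n and freq[i] > 0: cnts[freq[i]] += 1; i += 1`, returning the final (cnts, i)
def countLoop (freq : List Int) (n : Int) (cnts : List Int) (i : Int) : List Int × Int :=
  if _h : i ≤ n ∧ 0 < PySem.List.pyGetD freq i 0 then
    countLoop freq n (pyIncAt cnts (PySem.List.pyGetD freq i 0)) (i + 1)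
  else (cnts, i)
termination_by (n + 1 - i).toNat
decreasing_by omega

-- A: `while i <= n: if cnts[i] > 0: cnt_tup.append((i, cnts[i])); i += 1`
def cntTupLoop (cnts : List Int) (n i : Int) (acc : List (Int × Int)) : List (Int × Int) :=
  if _h : i ≤ n then
    cntTupLoop cnts n (i + 1)
      (if 0 < PySem.List.pyGetD cnts i 0 then acc ++ [(i, PySem.List.pyGetD cnts i 0)] else acc)
  else acc
termination_by (n + 1 - i).toNat
decreasing_by omega

-- A: first output loop with the pointer k into cnt_tup; returns (ans, final i)
def ansLoopA (tup : List (Int × Int)) (surplus i k val : Int) (ans : List Int) : List Int × Int :=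
  if _h : i ≤ surplus then
    if k < (tup.length : Int) ∧ (PySem.List.pyGetD tup k (0, 0)).1 = i then
      ansLoopA tup surplus (i + 1) (k + 1) (val + (PySem.List.pyGetD tup k (0, 0)).2)
        (ans ++ [val + (PySem.List.pyGetD tup k (0, 0)).2])
    else
      ansLoopA tup surplus (i + 1) k val (ans ++ [val])
  else (ans, i)
termination_by (surplus + 1 - i).toNat
decreasing_by all_goals omega

-- A: trailing loop `while i <= n: ans.append(n - i + 1); i += 1`
def tailLoopA (n i : Int) (ans : List Int) : List Int :=
  if _h : i ≤ n then tailLoopA n (i + 1) (ans ++ [n - i + 1]) else ans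
termination_by (n + 1 - i).toNat
decreasing_by omega

def solve (a : List Int) (n : Int) : List Int :=
  let freq := a.foldl pyIncAt (List.replicate (n + 1).toNat 0)
  let p := countLoop freq n (List.replicate (n + 1).toNat 0) 0
  let surplus := n - p.2
  let cnt_tup := cntTupLoop p.1 n 0 []
  let q := ansLoopA cnt_tup surplus 0 0 1 []
  tailLoopA n q.2 q.1

-- ===== PORT B =====
-- B: `while m <= n and freq[m] > 0: m += 1`
def mLoop (freq : List Int) (n : Int) (m : Int) : Int :=
  if _h : m ≤ n ∧ 0 < PySem.List.pyGetD freq m 0 then mLoop freq n (m + 1) else m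
termination_by (n + 1 - m).toNat
decreasing_by omega

-- B: inner `while p < len(pf) and pf[p] <= i: p += 1`
def advanceB (s : List Int) (i p : Int) : Int :=
  if _h : p < (s.length : Int) ∧ PySem.List.pyGetD s p 0 ≤ i then advanceB s i (p + 1) else p
termination_by ((s.length : Int) - p).toNat
decreasing_by omega

-- B: `for i in range(surplus + 1): <advance p>; ans.append(1 + p)`
def sweepB (s : List Int) (surplus i p : Int) (ans : List Int) : List Int × Int :=
  if _h : i < surplus + 1 then
    let p' := advanceB s i p
    sweepB s surplus (i + 1) p' (ans ++ [1 + p'])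
  else (ans, p)
termination_by (surplus + 1 - i).toNat
decreasing_by omega

def solve_alt (a : List Int) (n : Int) : List Int :=
  let freq := a.foldl pyIncAt (List.replicate (n + 1).toNat 0)
  let m := mLoop freq n 0
  let pf := PySem.List.sorted (PySem.List.slice freq none (some m)) (fun v => v) false
  let surplus := n - m
  let r := sweepB pf surplus 0 0 []
  -- `for i in range(surplus + 1, n + 1): ans.append(n - i + 1)`
  (PySem.List.pyRange (surplus + 1) (n + 1) 1).foldl (fun acc i => acc ++ [n - i + 1]) r.1

-- ===== PRECONDITION & SPEC =====
-- helper for Pre_solve: the index Python's (possibly negative) list subscript x resolves to in a list of length max(n+1,0)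
def normIdx (n x : Int) : Int := if x < 0 then x + max (n + 1) 0 else x
-- helper for Pre_solve: how many elements of a resolve to index i
def cntOf (a : List Int) (n i : Int) : Int := (a.countP (fun x => normIdx n x = i) : Nat)

-- Pre_solve holds exactly where the Python A returns normally (no IndexError): every x in a is a valid
-- (possibly negative) index into freq = [0]*(n+1), and every index i in the prefix scanned by the second
-- loop (all indices up to i carry a positive count) has its count within cnts' bounds (cnt ≤ n).
def Pre_solve (a : List Int) (n : Int) : Prop :=
  (∀ x ∈ a, -(max (n + 1) 0) ≤ x ∧ x < max (n + 1) 0) ∧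
  (∀ x ∈ a,
    (normIdx n x < (a.length : Int) ∧
      ∀ j ∈ List.range a.length, ((j : Int) ≤ normIdx n x → 0 < cntOf a n j)) →
    cntOf a n (normIdx n x) ≤ n)
instance (a : List Int) (n : Int) : Decidable (Pre_solve a n) := by unfold Pre_solve; infer_instance

def pvWitness_solve : List Int × Int := ([0, 1, 1], 3)

def Spec_solve (a : List Int) (n : Int) (out : List Int) : Prop := out = solve_alt a n
instance (a : List Int) (n : Int) (out : List Int) : Decidable (Spec_solve a n out) := by unfold Spec_solve; infer_instance

-- ===== CLAIM (what is proved, stated in full; the proofs are below) =====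
def Claim_equal_solve : Prop := ∀ (a : List Int) (n : Int), Dom_solve a n → Pre_solve a n → Spec_solve a n (solve a n)

-- ===== LEMMAS AND PROOFS =====

-- `l[x] += 1` keeps the length
theorem length_pyIncAt (l : List Int) (x : Int) : (pyIncAt l x).length = l.length := by
  simp [pyIncAt, PySem.List.length_pySetD]

-- a valid (possibly negative) Python index resolves to its normalized nonnegative form
theorem pyIdx?_valid (len : Nat) (x : Int) (h1 : -(len : Int) ≤ x) (h2 : x < (len : Int)) :
    PySem.List.pyIdx? len x = some (if x < 0 then x + (len : Int) else x).toNat := by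
  by_cases hx : x < 0
  · rw [if_pos hx]
    unfold PySem.List.pyIdx?
    rw [if_neg (by omega : ¬ 0 ≤ x), if_pos h1]
    congr 1
    omega
  · rw [if_neg hx]
    unfold PySem.List.pyIdx?
    rw [if_pos (by omega : 0 ≤ x), if_pos h2]

theorem pyGetD_valid (l : List Int) (x d : Int) (h1 : -(l.length : Int) ≤ x)
    (h2 : x < (l.length : Int)) :
    PySem.List.pyGetD l x d = l.getD (if x < 0 then x + (l.length : Int) else x).toNat d := by
  unfold PySem.List.pyGetD PySem.List.pyGet?
  rw [pyIdx?_valid l.length x h1 h2]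
  simp [List.getD_eq_getElem?_getD]

theorem pySetD_valid (l : List Int) (x v : Int) (h1 : -(l.length : Int) ≤ x)
    (h2 : x < (l.length : Int)) :
    PySem.List.pySetD l x v = l.set (if x < 0 then x + (l.length : Int) else x).toNat v := by
  unfold PySem.List.pySetD PySem.List.pySet?
  rw [pyIdx?_valid l.length x h1 h2]
  rfl

-- reading and writing `l[x] += 1` at an in-range index
theorem pyGetD_pyIncAt (l : List Int) (x j : Int) (hx0 : -(l.length : Int) ≤ x)
    (hx1 : x < (l.length : Int)) (hj0 : 0 ≤ j) (hj1 : j < (l.length : Int)) :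
    PySem.List.pyGetD (pyIncAt l x) j 0 =
      PySem.List.pyGetD l j 0 + (if (if x < 0 then x + (l.length : Int) else x) = j then 1 else 0) := by
  have hnx : 0 ≤ (if x < 0 then x + (l.length : Int) else x) ∧
      (if x < 0 then x + (l.length : Int) else x) < (l.length : Int) := by
    split_ifs <;> omega
  set nx := (if x < 0 then x + (l.length : Int) else x) with hnxdef
  have hset : pyIncAt l x = l.set nx.toNat (PySem.List.pyGetD l x 0 + 1) := by
    unfold pyIncAt
    rw [pySetD_valid l x _ hx0 hx1]
  have hlen' : (l.set nx.toNat (PySem.List.pyGetD l x 0 + 1)).length = l.length := by simp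
  have hjn : j.toNat < l.length := by omega
  have hnxn : nx.toNat < l.length := by omega
  rw [hset, PySem.List.pyGetD_eq_getElem _ 0 hj0 (by rw [hlen']; omega),
    PySem.List.pyGetD_eq_getElem l 0 hj0 hj1]
  rw [List.getElem_set]
  have hxval : PySem.List.pyGetD l x 0 = l[nx.toNat] := by
    rw [pyGetD_valid l x 0 hx0 hx1, ← hnxdef, List.getD_eq_getElem?_getD,
      List.getElem?_eq_getElem hnxn]
    rfl
  by_cases he : nx = j
  · rw [if_pos (by omega : nx.toNat = j.toNat), if_pos he, hxval]
    congr 2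
    omega
  · rw [if_neg (by omega : ¬ nx.toNat = j.toNat), if_neg he]
    omega

-- sum of a prefix after `l[j] += 1`
theorem sum_set_add_one (l : List Int) (j : Nat) (hj : j < l.length) :
    (l.set j (l[j] + 1)).sum = l.sum + 1 := by
  rw [List.sum_set, if_pos hj]
  have := List.take_append_drop j l
  have hsum : l.sum = (l.take j).sum + (l.drop j).sum := by
    conv_lhs => rw [← this]
    rw [List.sum_append]
  rw [hsum, List.drop_eq_getElem_cons hj, List.sum_cons]
  ring

theorem sum_take_pyIncAt (l : List Int) (f t : Int) (hf0 : 0 ≤ f) (hf1 : f < (l.length : Int))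
    (ht : 0 ≤ t) :
    ((pyIncAt l f).take (t + 1).toNat).sum
      = (l.take (t + 1).toNat).sum + (if f ≤ t then 1 else 0) := by
  have hset : pyIncAt l f = l.set f.toNat (l[f.toNat]'(by omega) + 1) := by
    unfold pyIncAt
    rw [pySetD_valid l f _ (by omega) hf1, if_neg (by omega : ¬ f < 0),
      PySem.List.pyGetD_eq_getElem l 0 hf0 hf1]
  rw [hset, List.take_set]
  by_cases hft : f ≤ t
  · have hlt : f.toNat < (l.take (t + 1).toNat).length := by
      simp
      omega
    have hgl : (l.take (t + 1).toNat)[f.toNat]'hlt = l[f.toNat]'(by omega) :=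
      List.getElem_take
    rw [if_pos hft, ← hgl, sum_set_add_one _ _ hlt]
  · rw [if_neg hft, List.set_eq_of_length_le (by simp; omega)]
    simp

-- freq = [0]*(n+1); for x in a: freq[x] += 1  —  the result is the histogram of normalized indices
theorem foldl_pyIncAt_getD (a : List Int) : ∀ (l : List Int),
    (∀ x ∈ a, -(l.length : Int) ≤ x ∧ x < (l.length : Int)) → ∀ j : Int, 0 ≤ j → j < (l.length : Int) →
    PySem.List.pyGetD (a.foldl pyIncAt l) j 0
      = PySem.List.pyGetD l j 0
        + (a.countP (fun x => (if x < 0 then x + (l.length : Int) else x) = j) : Nat) := by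
  induction a with
  | nil => intro l _ j _ _; simp
  | cons x t ih =>
      intro l hval j hj0 hj1
      rw [List.foldl_cons]
      have hx := hval x List.mem_cons_self
      have hlen : (pyIncAt l x).length = l.length := length_pyIncAt l x
      have := ih (pyIncAt l x)
        (by intro y hy; rw [hlen]; exact hval y (List.mem_cons_of_mem x hy))
        j hj0 (by rw [hlen]; exact hj1)
      rw [this, pyGetD_pyIncAt l x j hx.1 hx.2 hj0 hj1, List.countP_cons]
      have hpred : (t.countP fun y => decide ((if y < 0 then y + ((pyIncAt l x).length : Int) else y) = j))
          = (t.countP fun y => decide ((if y < 0 then y + (l.length : Int) else y) = j)) := by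
        rw [hlen]
      rw [hpred]
      push_cast
      simp only [decide_eq_true_eq]
      split_ifs with h1 <;> omega

-- the fold keeps the length
theorem length_foldl_pyIncAt (a : List Int) : ∀ (l : List Int), (a.foldl pyIncAt l).length = l.length := by
  induction a with
  | nil => intro l; rfl
  | cons x t ih => intro l; rw [List.foldl_cons, ih, length_pyIncAt]

-- the counting loop keeps cnts' length
theorem countLoop_length (freq : List Int) (n : Int) (cnts : List Int) (i : Int) :
    (countLoop freq n cnts i).1.length = cnts.length := by
  fun_induction countLoop freq n cnts i with
  | case1 cnts i h ih => rw [ih, length_pyIncAt]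
  | case2 => rfl

-- the counting loop's final index lies between its start and n+1
theorem countLoop_snd (freq : List Int) (n : Int) (cnts : List Int) (i : Int) :
    i ≤ (countLoop freq n cnts i).2 ∧ (countLoop freq n cnts i).2 ≤ max i (n + 1) := by
  fun_induction countLoop freq n cnts i with
  | case1 cnts i h ih => omega
  | case2 => simp

-- A's counting loop and B's bare m-scan walk the same index
theorem countLoop_snd_eq_mLoop (freq : List Int) (n : Int) (cnts : List Int) (i : Int) :
    (countLoop freq n cnts i).2 = mLoop freq n i := by
  fun_induction countLoop freq n cnts i with
  | case1 cnts i h ih =>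
      rw [ih]
      conv_rhs => rw [mLoop, dif_pos h]
  | case2 cnts i h => rw [mLoop, dif_neg h]

-- the histogram the counting loop builds, summed over counts 0..t, counts the scanned values ≤ t
theorem countLoop_take_sum (freq : List Int) (n : Int) (hfl : freq.length = (n + 1).toNat) :
    ∀ (cnts : List Int) (i : Int), 0 ≤ i → cnts.length = (n + 1).toNat →
    (∀ t : Int, i ≤ t → t ≤ n → (∀ j : Int, i ≤ j → j ≤ t → 0 < PySem.List.pyGetD freq j 0) →
      PySem.List.pyGetD freq t 0 ≤ n) →
    ∀ t : Int, 0 ≤ t → t ≤ n →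
    ((countLoop freq n cnts i).1.take (t + 1).toNat).sum
      = (cnts.take (t + 1).toNat).sum
        + (((freq.drop i.toNat).take ((countLoop freq n cnts i).2 - i).toNat).countP
            (fun v => v ≤ t) : Nat) := by
  intro cnts i
  fun_induction countLoop freq n cnts i with
  | case1 cnts i h ih =>
      intro h0i hlen hbound t ht0 htn
      set f := PySem.List.pyGetD freq i 0 with hfdef
      have hfn : f ≤ n := by
        apply hbound i le_rfl h.1
        intro j hj1 hj2
        have : j = i := le_antisymm hj2 hj1
        rw [this]
        exact h.2
      have hlen' : (pyIncAt cnts f).length = (n + 1).toNat := by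
        rw [length_pyIncAt, hlen]
      have hbound' : ∀ t : Int, i + 1 ≤ t → t ≤ n →
          (∀ j : Int, i + 1 ≤ j → j ≤ t → 0 < PySem.List.pyGetD freq j 0) →
          PySem.List.pyGetD freq t 0 ≤ n := by
        intro t h1 h2 h3
        apply hbound t (by omega) h2
        intro j hj1 hj2
        by_cases he : j = i
        · rw [he]; exact h.2
        · exact h3 j (by omega) hj2
      rw [ih (by omega) hlen' hbound' t ht0 htn]
      have hM := (countLoop_snd freq n (pyIncAt cnts f) (i + 1)).1
      set M := (countLoop freq n (pyIncAt cnts f) (i + 1)).2 with hMdef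
      have hfin : i.toNat < freq.length := by rw [hfl]; omega
      have hgf : freq[i.toNat] = f := by
        rw [hfdef, PySem.List.pyGetD_eq_getElem freq 0 (by omega) (by rw [hfl]; omega)]
      have hdrop : freq.drop i.toNat = freq[i.toNat] :: freq.drop (i.toNat + 1) :=
        List.drop_eq_getElem_cons hfin
      have htn1 : (M - i).toNat = (M - (i + 1)).toNat + 1 := by omega
      have hi1 : ((i : Int) + 1).toNat = i.toNat + 1 := by omega
      rw [sum_take_pyIncAt cnts f t (by omega) (by rw [hlen]; omega) ht0]
      rw [hdrop, htn1, List.take_succ_cons, List.countP_cons, hgf, hi1]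
      simp only [decide_eq_true_eq]
      push_cast
      split_ifs with h1 <;> omega
  | case2 cnts i h =>
      intro h0i hlen hbound t ht0 htn
      simp

-- A's cnt_tup builder: pulling the accumulator out front
theorem cntTupLoop_acc (cnts : List Int) (n : Int) : ∀ (i : Int) (acc : List (Int × Int)),
    cntTupLoop cnts n i acc = acc ++ cntTupLoop cnts n i [] := by
  intro i acc
  induction hf : (n + 1 - i).toNat generalizing i acc with
  | zero =>
      have h : ¬ i ≤ n := by omega
      conv_lhs => rw [cntTupLoop]
      conv_rhs => rw [cntTupLoop]
      simp [h]
  | succ k ih =>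
      have hin : i ≤ n := by omega
      conv_lhs => rw [cntTupLoop]
      conv_rhs => rw [cntTupLoop]
      simp only [hin, dite_true]
      have e := fun acc' => ih (i + 1) acc' (by omega)
      rw [e ((if 0 < PySem.List.pyGetD cnts i 0 then acc ++ [(i, PySem.List.pyGetD cnts i 0)] else acc))]
      rw [e ((if 0 < PySem.List.pyGetD cnts i 0 then [] ++ [(i, PySem.List.pyGetD cnts i 0)] else []))]
      split_ifs <;> simp

-- one unfolding of the builder
theorem cntTupLoop_step (cnts : List Int) (n i : Int) (h : i ≤ n) :
    cntTupLoop cnts n i [] =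
      (if 0 < PySem.List.pyGetD cnts i 0 then [(i, PySem.List.pyGetD cnts i 0)] else []) ++
        cntTupLoop cnts n (i + 1) [] := by
  rw [cntTupLoop]
  simp only [h, dite_true]
  split_ifs with h0
  · rw [cntTupLoop_acc]; simp
  · simp

-- every pair recorded by the builder from index i onward has first component ≥ i
theorem cntTupLoop_fst_ge (cnts : List Int) (n : Int) : ∀ (i : Int),
    ∀ p ∈ cntTupLoop cnts n i [], i ≤ p.1 := by
  intro i
  induction hf : (n + 1 - i).toNat generalizing i with
  | zero =>
      have h : ¬ i ≤ n := by omega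
      rw [cntTupLoop]
      simp [h]
  | succ k ih =>
      have hin : i ≤ n := by omega
      rw [cntTupLoop_step cnts n i hin]
      intro p hp
      rcases List.mem_append.1 hp with h | h
      · split_ifs at h <;> simp_all
      · have := ih (i + 1) (by omega) p h
        omega

-- the suffix view of an index ≥ the drop point
theorem pyGetD_drop (tup : List (Int × Int)) (k : Int) (d : Int × Int) (hk : 0 ≤ k) :
    PySem.List.pyGetD (tup.drop k.toNat) 0 d = PySem.List.pyGetD tup k d := by
  rw [PySem.List.pyGetD_zero, PySem.List.pyGetD_of_nonneg tup d hk]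
  simp [List.getD_eq_getElem?_getD, List.getElem?_drop]

-- the pointer k only ever reads the suffix tup.drop k
theorem ansLoopA_drop (surplus : Int) :
    ∀ (tup : List (Int × Int)) (i k val : Int) (ans : List Int), 0 ≤ k →
      ansLoopA tup surplus i k val ans = ansLoopA (tup.drop k.toNat) surplus i 0 val ans := by
  intro tup i k val ans hk
  induction hf : (surplus + 1 - i).toNat generalizing tup i k val ans with
  | zero =>
      have h : ¬ i ≤ surplus := by omega
      conv_lhs => rw [ansLoopA]
      conv_rhs => rw [ansLoopA]
      simp [h]
  | succ m ih =>
      have hin : i ≤ surplus := by omega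
      conv_lhs => rw [ansLoopA]
      conv_rhs => rw [ansLoopA]
      simp only [hin, dite_true]
      have hg : PySem.List.pyGetD (tup.drop k.toNat) 0 (0, 0) = PySem.List.pyGetD tup k (0, 0) :=
        pyGetD_drop tup k (0, 0) hk
      have hl : (0 : Int) < ((tup.drop k.toNat).length : Int) ↔ k < (tup.length : Int) := by
        simp [List.length_drop]; omega
      by_cases hc : k < (tup.length : Int) ∧ (PySem.List.pyGetD tup k (0, 0)).1 = i
      · have hc' : (0 : Int) < ((tup.drop k.toNat).length : Int) ∧
            (PySem.List.pyGetD (tup.drop k.toNat) 0 (0, 0)).1 = i := by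
          rw [hg, hl]; exact hc
        rw [if_pos hc, if_pos hc', hg]
        rw [ih tup (i + 1) (k + 1) _ _ (by omega) (by omega)]
        rw [ih (tup.drop k.toNat) (i + 1) (0 + 1) _ _ (by omega) (by omega)]
        have : ((k : Int) + 1).toNat = k.toNat + 1 := by omega
        simp [this, List.drop_drop]
      · have hc' : ¬ ((0 : Int) < ((tup.drop k.toNat).length : Int) ∧
            (PySem.List.pyGetD (tup.drop k.toNat) 0 (0, 0)).1 = i) := by
          rw [hg, hl]; exact hc
        rw [if_neg hc, if_neg hc']
        rw [ih tup (i + 1) k _ _ hk (by omega)]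

-- the dense accumulation step A's pointer walk amounts to
def accStep (s : Int × List Int) (c : Int) : Int × List Int := (s.1 + c, s.2 ++ [s.1 + c])

-- cnts entries are nonnegative (needed because cnt_tup drops zero entries)
theorem pyGetD_nonneg (l : List Int) (x d : Int) (hl : ∀ y ∈ l, 0 ≤ y) (hd : 0 ≤ d) :
    0 ≤ PySem.List.pyGetD l x d := by
  unfold PySem.List.pyGetD
  cases h : PySem.List.pyGet? l x with
  | none => simpa using hd
  | some y => simpa using hl y (PySem.List.mem_of_pyGet?_eq_some l h)

theorem nonneg_pyIncAt (l : List Int) (x : Int) (hl : ∀ y ∈ l, 0 ≤ y) :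
    ∀ y ∈ pyIncAt l x, 0 ≤ y := by
  intro y hy
  unfold pyIncAt PySem.List.pySetD at hy
  cases hs : PySem.List.pySet? l x (PySem.List.pyGetD l x 0 + 1) with
  | none => rw [hs] at hy; exact hl y hy
  | some l' =>
      rw [hs] at hy
      simp only [PySem.List.pySet?, Option.map_eq_some_iff] at hs
      obtain ⟨k, -, rfl⟩ := hs
      simp only [Option.getD_some] at hy
      rcases List.mem_or_eq_of_mem_set hy with h | rfl
      · exact hl y h
      · have := pyGetD_nonneg l x 0 hl le_rfl
        omega

theorem countLoop_nonneg (freq : List Int) (n : Int) (cnts : List Int) (i : Int)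
    (hc : ∀ y ∈ cnts, 0 ≤ y) : ∀ y ∈ (countLoop freq n cnts i).1, 0 ≤ y := by
  fun_induction countLoop freq n cnts i with
  | case1 cnts i h ih => exact ih (nonneg_pyIncAt _ _ hc)
  | case2 => exact hc

-- A's pointer walk over cnt_tup from index i = a fold of accStep over the dense region cnts[i : surplus+1]
theorem ansLoopA_dense (cnts : List Int) (n surplus : Int) (hsn : surplus ≤ n)
    (hnn : ∀ y ∈ cnts, 0 ≤ y) (hlen : cnts.length = (n + 1).toNat) :
    ∀ (i val : Int) (ans : List Int), 0 ≤ i →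
      ansLoopA (cntTupLoop cnts n i []) surplus i 0 val ans =
        ((((cnts.drop i.toNat).take (surplus + 1 - i).toNat).foldl accStep (val, ans)).2,
          if i ≤ surplus then surplus + 1 else i) := by
  intro i val ans hi
  induction hf : (surplus + 1 - i).toNat generalizing i val ans with
  | zero =>
      have h : ¬ i ≤ surplus := by omega
      conv_lhs => rw [ansLoopA]
      simp [h]
  | succ m ih =>
      have hin : i ≤ surplus := by omega
      have hmn : i.toNat < cnts.length := by rw [hlen]; omega
      have hgetc : PySem.List.pyGetD cnts i 0 = cnts[i.toNat] :=
        PySem.List.pyGetD_eq_getElem cnts 0 hi (by push_cast [hlen]; omega)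
      have hstep : (surplus + 1 - (i + 1)).toNat = m := by omega
      have hreg : (cnts.drop i.toNat).take (m + 1)
          = cnts[i.toNat] :: ((cnts.drop (i.toNat + 1)).take m) := by
        rw [List.drop_eq_getElem_cons hmn, List.take_succ_cons]
      have hi1 : ((i : Int) + 1).toNat = i.toNat + 1 := by omega
      by_cases hcpos : (0 : Int) < cnts[i.toNat]
      · rw [cntTupLoop_step cnts n i (by omega), hgetc, if_pos hcpos]
        simp only [List.cons_append, List.nil_append]
        conv_lhs => rw [ansLoopA]
        simp only [hin, dite_true]
        rw [if_pos (show (0 : Int) <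
              (((i, cnts[i.toNat]) :: cntTupLoop cnts n (i + 1) []).length : Int) ∧
              ((PySem.List.pyGetD ((i, cnts[i.toNat]) :: cntTupLoop cnts n (i + 1) []) 0 (0, 0)).1 = i) from
            ⟨by exact_mod_cast Nat.succ_pos _, by rw [PySem.List.pyGetD_zero_cons]⟩)]
        rw [PySem.List.pyGetD_zero_cons]
        rw [ansLoopA_drop surplus _ (i + 1) (0 + 1) _ _ (by omega)]
        have hd1 : ((0 : Int) + 1).toNat = 1 := by omega
        rw [hd1, List.drop_one, List.tail_cons]
        rw [ih (i + 1) _ _ (by omega) hstep]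
        rw [hi1, hreg]
        simp [accStep]
        omega
      · have hcz : cnts[i.toNat] = 0 := by
          have := hnn _ (List.getElem_mem hmn)
          omega
        rw [cntTupLoop_step cnts n i (by omega), hgetc, if_neg hcpos]
        simp only [List.nil_append]
        conv_lhs => rw [ansLoopA]
        simp only [hin, dite_true]
        rw [if_neg (show ¬ ((0 : Int) < ((cntTupLoop cnts n (i + 1) []).length : Int) ∧
              ((PySem.List.pyGetD (cntTupLoop cnts n (i + 1) []) 0 (0, 0)).1 = i)) by
            cases hr : cntTupLoop cnts n (i + 1) [] with
            | nil => simp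
            | cons p t =>
                rintro ⟨-, hfst⟩
                have hp := cntTupLoop_fst_ge cnts n (i + 1) p (by rw [hr]; exact List.mem_cons_self)
                rw [PySem.List.pyGetD_zero_cons] at hfst
                omega)]
        rw [ih (i + 1) _ _ (by omega) hstep]
        rw [hi1, hreg, hcz]
        simp [accStep]
        omega

-- the fold of accStep lists the running prefix sums
theorem foldl_accStep_map : ∀ (l : List Int) (v : Int) (ans : List Int),
    (l.foldl accStep (v, ans)).2
      = ans ++ (List.range l.length).map (fun k => v + (l.take (k + 1)).sum) := by
  intro l
  induction l with
  | nil => intro v ans; simp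
  | cons c t ih =>
      intro v ans
      rw [List.foldl_cons]
      show (t.foldl accStep (v + c, ans ++ [v + c])).2 = _
      rw [ih]
      simp only [List.length_cons, List.range_succ_eq_map, List.map_cons, List.map_map]
      simp [List.take_succ_cons, Function.comp, add_assoc]

-- A's trailing loop is a map over the ascending index range
theorem tailLoopA_map (n : Int) : ∀ (i : Int) (ans : List Int),
    tailLoopA n i ans = ans ++ (PySem.List.pyRange i (n + 1) 1).map (fun j => n - j + 1) := by
  intro i ans
  induction hf : (n + 1 - i).toNat generalizing i ans with
  | zero =>
      have h : ¬ i ≤ n := by omega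
      rw [tailLoopA, PySem.List.pyRange_one_eq_nil (by omega)]
      simp [h]
  | succ m ih =>
      have hin : i ≤ n := by omega
      rw [tailLoopA]
      simp only [hin, dite_true]
      rw [ih (i + 1) _ (by omega), PySem.List.pyRange_one_cons (by omega : i < n + 1)]
      simp

-- B's trailing for-append loop is the same map
theorem foldl_append_map (f : Int → Int) : ∀ (l : List Int) (ans : List Int),
    l.foldl (fun acc i => acc ++ [f i]) ans = ans ++ l.map f := by
  intro l
  induction l with
  | nil => intro ans; simp
  | cons x t ih => intro ans; simp [ih]

-- B's pointer advance lands exactly on the number of sorted entries ≤ i, keeping them behind it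
theorem advanceB_eq (s : List Int) (hs : s.Pairwise (· ≤ ·)) (i : Int) :
    ∀ p : Int, 0 ≤ p → p ≤ (s.length : Int) →
      (∀ (k : Nat) (hk : k < s.length), (k : Int) < p → s[k] ≤ i) →
      advanceB s i p = (s.countP (fun v => v ≤ i) : Int) ∧
        (∀ (k : Nat) (hk : k < s.length), (k : Int) < advanceB s i p → s[k] ≤ i) := by
  intro p
  induction hf : ((s.length : Int) - p).toNat generalizing p with
  | zero =>
      intro hp0 hplen inv
      have hc : ¬ (p < (s.length : Int) ∧ PySem.List.pyGetD s p 0 ≤ i) := by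
        intro hc
        omega
      rw [advanceB, dif_neg hc]
      refine ⟨?_, inv⟩
      have hpeq : p = (s.length : Int) := by omega
      rw [hpeq]
      congr 1
      symm
      apply List.countP_eq_length.mpr
      intro v hv
      obtain ⟨k, hk, rfl⟩ := List.mem_iff_getElem.mp hv
      exact decide_eq_true (inv k hk (by omega))
  | succ m ih =>
      by_cases hc : p < (s.length : Int) ∧ PySem.List.pyGetD s p 0 ≤ i
      · intro hp0 hplen inv
        rw [advanceB, dif_pos hc]
        refine ih (p + 1) (by omega) (by omega) (by omega) ?_
        intro k hk hklt
        by_cases hke : (k : Int) < p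
        · exact inv k hk hke
        · have : k = p.toNat := by omega
          subst this
          rw [← PySem.List.pyGetD_eq_getElem s 0 hp0 hc.1]
          exact hc.2
      · intro hp0 hplen inv
        rw [advanceB, dif_neg hc]
        refine ⟨?_, inv⟩
        have hsplit : s.countP (fun v => v ≤ i)
            = (s.take p.toNat).countP (fun v => v ≤ i) + (s.drop p.toNat).countP (fun v => v ≤ i) := by
          conv_lhs => rw [← List.take_append_drop p.toNat s]
          rw [List.countP_append]
        have htake : (s.take p.toNat).countP (fun v => v ≤ i) = p.toNat := by
          have hall : ∀ v ∈ s.take p.toNat, decide (v ≤ i) = true := by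
            intro v hv
            obtain ⟨k, hk, rfl⟩ := List.mem_iff_getElem.mp hv
            have hk' : k < s.length := by
              have := hk
              simp at this
              omega
            rw [List.getElem_take]
            apply decide_eq_true
            apply inv k hk'
            have : k < p.toNat := by
              have := hk
              simp at this
              omega
            omega
          rw [List.countP_eq_length.mpr hall]
          simp
          omega
        have hdropz : (s.drop p.toNat).countP (fun v => v ≤ i) = 0 := by
          by_cases hpl : p.toNat < s.length
          · have hget : i < s[p.toNat] := by
              have : ¬ PySem.List.pyGetD s p 0 ≤ i := by
                intro hle
                exact hc ⟨by omega, hle⟩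
              rw [PySem.List.pyGetD_eq_getElem s 0 hp0 (by omega)] at this
              omega
            have hdc : s.drop p.toNat = s[p.toNat] :: s.drop (p.toNat + 1) :=
              List.drop_eq_getElem_cons hpl
            have hpw : (s.drop p.toNat).Pairwise (· ≤ ·) :=
              hs.sublist (List.drop_sublist _ _)
            rw [hdc] at hpw
            apply List.countP_eq_zero.mpr
            intro v hv
            rw [hdc] at hv
            rcases List.mem_cons.mp hv with rfl | hv'
            · simp; omega
            · have := (List.pairwise_cons.mp hpw).1 v hv'
              simp; omega
          · rw [List.drop_eq_nil_of_le (by omega)]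
            rfl
        rw [hsplit, htake, hdropz]
        omega

-- B's sweep emits 1 + (number of sorted entries ≤ i) for each i
theorem sweepB_map (s : List Int) (hs : s.Pairwise (· ≤ ·)) (surplus : Int) :
    ∀ (i p : Int) (ans : List Int), 0 ≤ p → p ≤ (s.length : Int) →
      (∀ (k : Nat) (hk : k < s.length), (k : Int) < p → s[k] ≤ i) →
      (sweepB s surplus i p ans).1
        = ans ++ (List.range (surplus + 1 - i).toNat).map
            (fun (k : Nat) => 1 + (s.countP (fun v => v ≤ i + (k : Int)) : Int)) := by
  intro i p ans
  induction hf : (surplus + 1 - i).toNat generalizing i p ans with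
  | zero =>
      intro _ _ _
      have h : ¬ i < surplus + 1 := by omega
      rw [sweepB, dif_neg h]
      simp
  | succ m ih =>
      intro hp0 hplen inv
      have hin : i < surplus + 1 := by omega
      rw [sweepB, dif_pos hin]
      have hadv := advanceB_eq s hs i p hp0 hplen inv
      have hcle : (s.countP (fun v => v ≤ i) : Int) ≤ (s.length : Int) := by
        exact_mod_cast List.countP_le_length
      show (sweepB s surplus (i + 1) (advanceB s i p) (ans ++ [1 + advanceB s i p])).1 = _
      rw [ih (i + 1) (advanceB s i p) (ans ++ [1 + advanceB s i p]) (by omega)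
        (by rw [hadv.1]; positivity) (by rw [hadv.1]; exact hcle)
        (by
          intro k hk hklt
          have := hadv.2 k hk hklt
          omega)]
      rw [List.range_succ_eq_map, List.map_cons, List.map_map]
      simp only [Nat.cast_zero, add_zero, List.append_assoc, List.singleton_append]
      rw [hadv.1]
      congr 2
      apply List.map_congr_left
      intro k _
      simp only [Function.comp_apply]
      have hcast : i + ((k + 1 : Nat) : Int) = i + 1 + (k : Int) := by push_cast; ring
      rw [Nat.succ_eq_add_one, hcast]

-- at most one bucket j ∈ range counts any fixed element
theorem sum_countP_le_length (g : Int → Int) : ∀ (a : List Int) (k : Nat),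
    (∑ j ∈ Finset.range k, a.countP (fun x => g x = (j : Int))) ≤ a.length := by
  intro a
  induction a with
  | nil => intro k; simp
  | cons x t ih =>
      intro k
      simp only [List.countP_cons, List.length_cons]
      rw [Finset.sum_add_distrib]
      have hind : (∑ j ∈ Finset.range k, if decide (g x = (j : Int)) = true then 1 else 0) ≤ 1 := by
        calc (∑ j ∈ Finset.range k, if decide (g x = (j : Int)) = true then 1 else 0)
            ≤ (∑ j ∈ Finset.range k, if j = (g x).toNat then 1 else 0) := by
              apply Finset.sum_le_sum
              intro j _
              simp only [decide_eq_true_eq]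
              split_ifs with h1 h2 <;> omega
          _ ≤ 1 := by
              rw [Finset.sum_ite_eq' (Finset.range k) ((g x).toNat) (fun _ => 1)]
              split_ifs <;> omega
      have := ih k
      omega

-- if every bucket 0..k has a positive count, the list has more than k elements
theorem pigeonhole (g : Int → Int) (a : List Int) (k : Nat)
    (h : ∀ j : Nat, j ≤ k → 0 < a.countP (fun x => g x = (j : Int))) : k < a.length := by
  have h1 : k + 1 ≤ ∑ j ∈ Finset.range (k + 1), a.countP (fun x => g x = (j : Int)) := by
    calc k + 1 = ∑ _j ∈ Finset.range (k + 1), 1 := by simp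
      _ ≤ _ := by
          apply Finset.sum_le_sum
          intro j hj
          exact h j (by simpa using Nat.lt_succ_iff.mp (Finset.mem_range.mp hj))
  have h2 := sum_countP_le_length g a (k + 1)
  omega

-- pyIncAt on the empty list is the empty list (the n < 0 degenerate case)
theorem foldl_pyIncAt_nil (a : List Int) : a.foldl pyIncAt [] = [] := by
  induction a with
  | nil => rfl
  | cons x t ih =>
      have : pyIncAt [] x = [] := by
        unfold pyIncAt PySem.List.pySetD
        have hn : PySem.List.pySet? ([] : List Int) x (PySem.List.pyGetD ([] : List Int) x 0 + 1) = none := by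
          rw [PySem.List.pySet?_eq_none_iff]
          simp [PySem.Raise.InRange]
        rw [hn]
        rfl
      rw [List.foldl_cons, this, ih]

-- the main equivalence
theorem solve_eq (a : List Int) (n : Int) (hpre : Pre_solve a n) : solve a n = solve_alt a n := by
  unfold solve solve_alt
  dsimp only
  by_cases hn : 0 ≤ n
  · -- main case
    set F := a.foldl pyIncAt (List.replicate (n + 1).toNat 0) with hFdef
    set P := countLoop F n (List.replicate (n + 1).toNat 0) 0 with hPdef
    have hFlen : F.length = (n + 1).toNat := by
      rw [hFdef, length_foldl_pyIncAt]; simp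
    have hPlen : P.1.length = (n + 1).toNat := by
      rw [hPdef, countLoop_length]; simp
    have hPnn : ∀ y ∈ P.1, 0 ≤ y := by
      rw [hPdef]; exact countLoop_nonneg _ _ _ _ (by simp)
    have hsnd := countLoop_snd F n (List.replicate (n + 1).toNat 0) 0
    rw [← hPdef] at hsnd
    have hs1 : n - P.2 ≤ n := by omega
    have hs2 : -1 ≤ n - P.2 := by omega
    have hm : mLoop F n 0 = P.2 := by
      rw [hPdef]; exact (countLoop_snd_eq_mLoop F n _ 0).symm
    rw [hm]
    -- characterize freq as the histogram of a
    have hmax : max (n + 1) 0 = n + 1 := by omega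
    have hchar : ∀ j : Int, 0 ≤ j → j ≤ n → PySem.List.pyGetD F j 0 = cntOf a n j := by
      intro j hj0 hj1
      rw [hFdef]
      have hlrep : ((List.replicate (n + 1).toNat (0 : Int)).length : Int) = n + 1 := by
        simp; omega
      rw [foldl_pyIncAt_getD a _
        (by intro x hx; rw [hlrep]; have := hpre.1 x hx; omega)
        j hj0 (by rw [hlrep]; omega)]
      have hz : PySem.List.pyGetD (List.replicate (n + 1).toNat (0 : Int)) j 0 = 0 := by
        rw [PySem.List.pyGetD_eq_getElem _ 0 hj0 (by rw [hlrep]; omega)]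
        simp
      rw [hz, hlrep]
      unfold cntOf normIdx
      simp only [hmax]
      simp
    -- the scanned-prefix bound required by countLoop_take_sum, from Pre_solve
    have hbound : ∀ t : Int, 0 ≤ t → t ≤ n →
        (∀ j : Int, 0 ≤ j → j ≤ t → 0 < PySem.List.pyGetD F j 0) →
        PySem.List.pyGetD F t 0 ≤ n := by
      intro t ht0 htn hpos
      have hcnt : 0 < cntOf a n t := by rw [← hchar t ht0 htn]; exact hpos t ht0 le_rfl
      have hex : ∃ x ∈ a, normIdx n x = t := by
        unfold cntOf at hcnt
        have : 0 < a.countP (fun x => normIdx n x = t) := by exact_mod_cast hcnt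
        obtain ⟨x, hx, hpx⟩ := List.countP_pos_iff.mp this
        exact ⟨x, hx, of_decide_eq_true hpx⟩
      obtain ⟨x, hx, hnx⟩ := hex
      have htlen : t < (a.length : Int) := by
        have hpig := pigeonhole (normIdx n) a t.toNat (by
          intro j hj
          have hji : ((j : Nat) : Int) ≤ t := by omega
          have hji0 : (0 : Int) ≤ (j : Int) := by omega
          have := hpos j hji0 (by omega)
          rw [hchar j hji0 (by omega)] at this
          unfold cntOf at this
          exact_mod_cast this)
        omega
      have hp2 := hpre.2 x hx
      rw [hnx] at hp2
      have hres := hp2 ⟨htlen, by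
        intro j hjr hjle
        have hj0 : (0 : Int) ≤ (j : Int) := by omega
        have hjn : (j : Int) ≤ n := by omega
        rw [← hchar j hj0 hjn]
        exact hpos j hj0 (by omega)⟩
      rw [← hchar t ht0 htn] at hres
      exact hres
    -- A's side: dense fold plus tail map
    rw [ansLoopA_dense P.1 n (n - P.2) hs1 hPnn hPlen 0 1 [] le_rfl]
    rw [tailLoopA_map n]
    have hif : (if (0 : Int) ≤ n - P.2 then n - P.2 + 1 else 0) = n - P.2 + 1 := by
      split_ifs <;> omega
    rw [hif]
    -- B's side: tail fold is the same map
    rw [foldl_append_map]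
    congr 1
    -- prefix parts
    rw [foldl_accStep_map]
    have hsorted : (PySem.List.sorted (PySem.List.slice F none (some P.2)) (fun v => v) false).Pairwise (· ≤ ·) := by
      have := PySem.List.sorted_pairwise (PySem.List.slice F none (some P.2)) (fun v => v)
      simpa using this
    rw [sweepB_map _ hsorted (n - P.2) 0 0 [] le_rfl (by positivity)
      (by intro k hk hklt; omega)]
    simp only [List.nil_append, Int.toNat_zero, List.drop_zero, sub_zero, zero_add]
    have hlenmin : (P.1.take (n - P.2 + 1).toNat).length = (n - P.2 + 1).toNat := by
      rw [List.length_take, hPlen]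
      omega
    rw [hlenmin]
    apply List.map_congr_left
    intro k hk
    have hkmem : k < (n - P.2 + 1).toNat := List.mem_range.mp hk
    have hks : (k : Int) ≤ n - P.2 := by omega
    have hperm : ((PySem.List.sorted (PySem.List.slice F none (some P.2)) (fun v => v) false).countP
        (fun v => v ≤ (k : Int)))
        = ((PySem.List.slice F none (some P.2)).countP (fun v => v ≤ (k : Int))) :=
      (PySem.List.sorted_perm _ _ _).countP_eq _
    rw [hperm, PySem.List.slice_to F (by omega : (0 : Int) ≤ P.2)]
    rw [List.take_take]
    have hmin : min (k + 1) (n - P.2 + 1).toNat = k + 1 := by omega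
    rw [hmin]
    have hts := countLoop_take_sum F n hFlen (List.replicate (n + 1).toNat 0) 0 le_rfl
      (by simp) (by intro t ht0 htn hpos; exact hbound t ht0 htn (fun j hj0 hjt => hpos j hj0 hjt))
      (k : Int) (by omega) (by omega)
    rw [← hPdef] at hts
    have hk1 : ((k : Int) + 1).toNat = k + 1 := by omega
    rw [hk1] at hts
    have hz : ((List.replicate (n + 1).toNat (0 : Int)).take (k + 1)).sum = 0 := by
      rw [List.take_replicate]
      simp
    rw [hz, zero_add] at hts
    have hdz : (F.drop (0 : Int).toNat) = F := by simp
    rw [hdz] at hts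
    have hsub : (P.2 - 0 : Int) = P.2 := by ring
    rw [hsub] at hts
    rw [hts]
  · -- n < 0: every loop is skipped on both sides
    have hrep : (n + 1).toNat = 0 := by omega
    rw [hrep]
    simp only [List.replicate_zero]
    rw [foldl_pyIncAt_nil]
    have hcl : countLoop [] n [] 0 = ([], 0) := by
      rw [countLoop, dif_neg (fun hc => absurd hc.1 (by omega))]
    have hml : mLoop [] n 0 = 0 := by
      rw [mLoop, dif_neg (fun hc => absurd hc.1 (by omega))]
    rw [hcl, hml]
    have htup : cntTupLoop [] n 0 [] = [] := by
      rw [cntTupLoop, dif_neg (by omega : ¬ (0 : Int) ≤ n)]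
    rw [htup]
    have hans : ansLoopA [] (n - 0) 0 0 1 [] = ([], 0) := by
      rw [ansLoopA, dif_neg (by omega : ¬ (0 : Int) ≤ n - 0)]
    rw [hans]
    have htail : tailLoopA n 0 [] = [] := by
      rw [tailLoopA, dif_neg (by omega : ¬ (0 : Int) ≤ n)]
    rw [htail]
    have hsw : sweepB (PySem.List.sorted (PySem.List.slice [] none (some 0)) (fun v => v) false)
        (n - 0) 0 0 [] = ([], 0) := by
      rw [sweepB, dif_neg (by omega : ¬ (0 : Int) < n - 0 + 1)]
    rw [hsw]
    rw [PySem.List.pyRange_one_eq_nil (by omega : n + 1 ≤ n - 0 + 1)]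
    rfl

-- ===== VERDICT (by name: the statement is the Claim_ definition above) =====
theorem solve_spec : Claim_equal_solve := by
  intro a n _ hpre
  unfold Spec_solve
  exact solve_eq a n hpre
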